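-- pv_equiv track=rewrite | github.com/AlifSrSE/ProblemSolves | 1980D-gcdSequence.py | solve
-- ===== SOURCE A (Python) =====
-- import math
--
-- def solve(a):
--     n = len(a)
--
--     left_sorted = [False] * n
--     left_sorted[0] = True
--     if n > 1:
--         left_sorted[1] = True
--     for i in range(2, n):
--         left_sorted[i] = left_sorted[i - 1] and math.gcd(a[i], a[i - 1]) >= math.gcd(a[i - 1], a[i - 2])
--
--     right_sorted = [False] * n
--     right_sorted[n - 1] = True
--     if n > 1:
--         right_sorted[n - 2] = True
--     for i in range(n - 3, -1, -1):
--         right_sorted[i] = right_sorted[i + 1] and math.gcd(a[i], a[i + 1]) <= math.gcd(a[i + 1], a[i + 2])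
--
--     return any(
--         (i == 0 or left_sorted[i - 1])
--         and (i == n - 1 or right_sorted[i + 1])
--         and (i <= 1 or i == n - 1 or math.gcd(a[i - 1], a[i + 1]) >= math.gcd(a[i - 1], a[i - 2]))
--         and (i >= n - 2 or i == 0 or math.gcd(a[i - 1], a[i + 1]) <= math.gcd(a[i + 1], a[i + 2]))
--         for i in range(n)
--     )
-- ===== SOURCE B (Python) =====
-- import math
-- def solve(a):
--     n = len(a)
--     def ok(x):
--         g = [math.gcd(x[j], x[j+1]) for j in range(len(x)-1)]
--         return all(g[j] <= g[j+1] for j in range(len(g)-1))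
--     return any(ok(a[:i] + a[i+1:]) for i in range(n))
-- ===== Notes on version B (the rewrite author's own statement) =====
-- stated objective: simpler
-- what changed: Replaces A's prefix/suffix validity arrays and O(1) bridge checks per candidate with the direct definition: for each index, rebuild the list without it and test whether its adjacent-GCD sequence is non-decreasing.
import Mathlib
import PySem

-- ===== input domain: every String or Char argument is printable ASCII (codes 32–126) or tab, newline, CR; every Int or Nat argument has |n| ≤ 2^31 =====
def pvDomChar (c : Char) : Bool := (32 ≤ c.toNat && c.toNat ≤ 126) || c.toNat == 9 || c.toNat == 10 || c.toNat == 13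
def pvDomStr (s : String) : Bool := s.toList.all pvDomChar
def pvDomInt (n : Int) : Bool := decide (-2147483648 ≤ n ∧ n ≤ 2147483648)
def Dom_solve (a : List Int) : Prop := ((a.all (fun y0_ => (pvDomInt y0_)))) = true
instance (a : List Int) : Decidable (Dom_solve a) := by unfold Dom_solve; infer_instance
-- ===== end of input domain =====

-- B replaces A's prefix/suffix validity arrays with the direct definition (delete each index,
-- re-check the adjacent-GCD sequence); objective: simpler. Equivalence on nonempty lists
-- (Python A raises IndexError on [], which Pre_solve excludes; B returns False there).

-- ===== PORT A =====
-- left_sorted[i] of A, expressed as the recurrence the loop fills the array with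
def leftS (a : List Int) : Nat → Bool
  | 0 => true
  | 1 => true
  | (i+2) => leftS a (i+1) &&
      decide (Int.gcd (a.getD (i+2) 0) (a.getD (i+1) 0) ≥ Int.gcd (a.getD (i+1) 0) (a.getD i 0))

-- right_sorted[i] of A: downward loop from n-1
def rightS (a : List Int) (n i : Nat) : Bool :=
  if n ≤ i + 2 then true
  else rightS a n (i+1) &&
      decide (Int.gcd (a.getD i 0) (a.getD (i+1) 0) ≤ Int.gcd (a.getD (i+1) 0) (a.getD (i+2) 0))
  termination_by n - i

def solve (a : List Int) : Bool :=
  let n := a.length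
  (List.range n).any fun i =>
    (i == 0 || leftS a (i-1)) &&
    (i == n-1 || rightS a n (i+1)) &&
    (decide (i ≤ 1) || i == n-1 ||
      decide (Int.gcd (a.getD (i-1) 0) (a.getD (i+1) 0) ≥ Int.gcd (a.getD (i-1) 0) (a.getD (i-2) 0))) &&
    (decide (n-2 ≤ i) || i == 0 ||
      decide (Int.gcd (a.getD (i-1) 0) (a.getD (i+1) 0) ≤ Int.gcd (a.getD (i+1) 0) (a.getD (i+2) 0)))

-- ===== PORT B =====
-- g = [gcd(x[j], x[j+1]) for j in range(len(x)-1)]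
def gseqB (x : List Int) : List Nat :=
  (List.range (x.length - 1)).map fun j => Int.gcd (x.getD j 0) (x.getD (j+1) 0)

-- all(g[j] <= g[j+1] for j in range(len(g)-1))
def okB (x : List Int) : Bool :=
  let gs := gseqB x
  (List.range (gs.length - 1)).all fun j => decide (gs.getD j 0 ≤ gs.getD (j+1) 0)

def solve_alt (a : List Int) : Bool :=
  (List.range a.length).any fun i => okB (a.take i ++ a.drop (i+1))

-- ===== PRECONDITION & SPEC =====
-- Pre_ excludes exactly the empty list, on which Python A raises IndexError.
def Pre_solve (a : List Int) : Prop := a ≠ []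
instance (a : List Int) : Decidable (Pre_solve a) := by unfold Pre_solve; infer_instance
def pvWitness_solve : List Int := ([2, 4, 8])


def Spec_solve (a : List Int) (out : Bool) : Prop := out = solve_alt a
instance (a : List Int) (out : Bool) : Decidable (Spec_solve a out) := by unfold Spec_solve; infer_instance

-- ===== CLAIM (what is proved, stated in full; the proofs are below) =====
def Claim_equal_solve : Prop := ∀ (a : List Int), Dom_solve a → Pre_solve a → Spec_solve a (solve a)

-- ===== LEMMAS AND PROOFS =====

-- the adjacent-gcd value at position j
def gg (a : List Int) (j : Nat) : Nat := Int.gcd (a.getD j 0) (a.getD (j+1) 0)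

lemma getD_map_range (f : Nat → Nat) (m j : Nat) (h : j < m) :
    ((List.range m).map f).getD j 0 = f j := by
  rw [List.getD_eq_getElem?_getD]
  simp [h]

lemma gseqB_getD (x : List Int) (j : Nat) (h : j + 2 ≤ x.length) :
    (gseqB x).getD j 0 = gg x j := by
  unfold gseqB gg
  exact getD_map_range _ _ _ (by omega)

lemma okB_iff (x : List Int) :
    okB x = true ↔ ∀ j, j + 3 ≤ x.length → gg x j ≤ gg x (j+1) := by
  have hlen : (gseqB x).length = x.length - 1 := by simp [gseqB]
  constructor
  · intro h j hj
    have := (List.all_eq_true.mp h) j (by rw [List.mem_range, hlen]; omega)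
    rw [gseqB_getD x j (by omega), gseqB_getD x (j+1) (by omega), decide_eq_true_iff] at this
    exact this
  · intro h
    apply List.all_eq_true.mpr
    intro j hj
    rw [List.mem_range, hlen] at hj
    rw [gseqB_getD x j (by omega), gseqB_getD x (j+1) (by omega), decide_eq_true_iff]
    exact h j (by omega)

lemma left_iff (a : List Int) : ∀ i, leftS a i = true ↔ (∀ j, j + 2 ≤ i → gg a j ≤ gg a (j+1)) := by
  intro i
  induction i using Nat.strong_induction_on with
  | _ i ih =>
    match i with
    | 0 => exact ⟨fun _ j hj => absurd hj (by omega), fun _ => rfl⟩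
    | 1 => exact ⟨fun _ j hj => absurd hj (by omega), fun _ => rfl⟩
    | (k+2) =>
      rw [leftS, Bool.and_eq_true, ih (k+1) (by omega), decide_eq_true_iff]
      constructor
      · rintro ⟨h1, h2⟩ j hj
        rcases Nat.lt_or_ge j k with hl | hl
        · exact h1 j (by omega)
        · have hjk : j = k := by omega
          rw [hjk]
          unfold gg
          rw [Int.gcd_comm (a.getD k 0) (a.getD (k+1) 0),
              Int.gcd_comm (a.getD (k+1) 0) (a.getD (k+1+1) 0)]
          exact h2
      · intro h
        refine ⟨fun j hj => h j (by omega), ?_⟩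
        have := h k (by omega)
        unfold gg at this
        rw [Int.gcd_comm (a.getD k 0) (a.getD (k+1) 0),
            Int.gcd_comm (a.getD (k+1) 0) (a.getD (k+1+1) 0)] at this
        exact this

lemma right_iff (a : List Int) (n : Nat) :
    ∀ i, rightS a n i = true ↔ (∀ j, i ≤ j → j + 2 < n → gg a j ≤ gg a (j+1)) := by
  have H : ∀ k i, n - i ≤ k → (rightS a n i = true ↔ (∀ j, i ≤ j → j + 2 < n → gg a j ≤ gg a (j+1))) := by
    intro k
    induction k with
    | zero =>
      intro i hi
      rw [rightS, if_pos (by omega)]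
      exact ⟨fun _ j hj hj2 => absurd hj2 (by omega), fun _ => rfl⟩
    | succ k ih =>
      intro i hi
      by_cases h : n ≤ i + 2
      · rw [rightS, if_pos h]
        exact ⟨fun _ j hj hj2 => absurd hj2 (by omega), fun _ => rfl⟩
      · rw [rightS, if_neg h, Bool.and_eq_true, ih (i+1) (by omega), decide_eq_true_iff]
        constructor
        · rintro ⟨h1, h2⟩ j hj hj2
          rcases Nat.lt_or_ge i j with hl | hl
          · exact h1 j (by omega) hj2
          · have hji : j = i := by omega
            subst hji
            exact h2
        · intro hfa
          exact ⟨fun j hj hj2 => hfa j (by omega) hj2, hfa i (by omega) (by omega)⟩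
  exact fun i => H n i (by omega)

-- element access in the list with index i removed
lemma getD_remove (a : List Int) (i : Nat) (hi : i < a.length) (j : Nat) :
    (a.take i ++ a.drop (i+1)).getD j 0 = if j < i then a.getD j 0 else a.getD (j+1) 0 := by
  have hti : (a.take i).length = i := by
    rw [List.length_take]; omega
  by_cases hj : j < i
  · rw [if_pos hj, List.getD_eq_getElem?_getD, List.getElem?_append_left (by omega),
      List.getElem?_take, if_pos hj, ← List.getD_eq_getElem?_getD]
  · rw [if_neg hj, List.getD_eq_getElem?_getD, List.getElem?_append_right (by omega),
      List.getElem?_drop, hti, ← List.getD_eq_getElem?_getD]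
    congr 1
    omega

lemma gg_remove (a : List Int) (i : Nat) (hi : i < a.length) (j : Nat) :
    gg (a.take i ++ a.drop (i+1)) j =
      Int.gcd (if j < i then a.getD j 0 else a.getD (j+1) 0)
              (if j + 1 < i then a.getD (j+1) 0 else a.getD (j+2) 0) := by
  unfold gg
  rw [getD_remove a i hi j, getD_remove a i hi (j+1)]

lemma len_remove (a : List Int) (i : Nat) (hi : i < a.length) :
    (a.take i ++ a.drop (i+1)).length = a.length - 1 := by
  simp [List.length_take, List.length_drop]; omega

-- A's per-candidate test equals B's brute-force re-check, for each i < n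
lemma cond_iff (a : List Int) (i : Nat) (hi : i < a.length) :
    ((i == 0 || leftS a (i-1)) &&
     (i == a.length-1 || rightS a a.length (i+1)) &&
     (decide (i ≤ 1) || i == a.length-1 ||
       decide (Int.gcd (a.getD (i-1) 0) (a.getD (i+1) 0) ≥ Int.gcd (a.getD (i-1) 0) (a.getD (i-2) 0))) &&
     (decide (a.length-2 ≤ i) || i == 0 ||
       decide (Int.gcd (a.getD (i-1) 0) (a.getD (i+1) 0) ≤ Int.gcd (a.getD (i+1) 0) (a.getD (i+2) 0)))) = true
    ↔ okB (a.take i ++ a.drop (i+1)) = true := by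
  set n := a.length with hn
  rw [okB_iff, len_remove a i hi]
  simp only [Bool.and_eq_true, Bool.or_eq_true, beq_iff_eq, decide_eq_true_iff,
    left_iff, right_iff]
  constructor
  · rintro ⟨⟨⟨hL, hR⟩, h3⟩, h4⟩ j hj
    rw [gg_remove a i hi j, gg_remove a i hi (j+1)]
    by_cases c1 : j + 1 + 1 < i
    · -- fully inside the prefix
      rw [if_pos (show j < i by omega), if_pos (show j + 1 < i by omega), if_pos c1]
      rcases hL with h0 | hL
      · omega
      · exact hL j (by omega)
    · by_cases c2 : j + 1 < i
      · -- bridge at i = j+2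
        rw [if_pos (show j < i by omega), if_pos c2, if_neg c1]
        rcases h3 with (h0 | h0) | h3
        · omega
        · omega
        · have e1 : i - 2 = j := by omega
          have e2 : i - 1 = j + 1 := by omega
          have e3 : i + 1 = j + 3 := by omega
          rw [e1, e2, e3] at h3
          rw [Int.gcd_comm (a.getD (j+1) 0) (a.getD j 0)] at h3
          exact h3
      · by_cases c3 : j < i
        · -- bridge at i = j+1
          rw [if_pos c3, if_neg c2, if_neg c1]
          rcases h4 with (h0 | h0) | h4
          · omega
          · omega
          · have e1 : i - 1 = j := by omega
            have e2 : i + 1 = j + 2 := by omega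
            have e3 : i + 2 = j + 3 := by omega
            rw [e1, e2, e3] at h4
            exact h4
        · -- fully inside the suffix
          rw [if_neg c3, if_neg c2, if_neg c1]
          rcases hR with h0 | hR
          · omega
          · exact hR (j+1) (by omega) (by omega)
  · intro h
    refine ⟨⟨⟨?_, ?_⟩, ?_⟩, ?_⟩
    · by_cases h0 : i = 0
      · exact Or.inl h0
      · refine Or.inr (fun j hj => ?_)
        have := h j (by omega)
        rw [gg_remove a i hi j, gg_remove a i hi (j+1),
          if_pos (show j < i by omega), if_pos (show j + 1 < i by omega),
          if_pos (show j + 1 + 1 < i by omega)] at this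
        exact this
    · by_cases h0 : i = n - 1
      · exact Or.inl h0
      · refine Or.inr (fun j hj hj2 => ?_)
        have := h (j-1) (by omega)
        rw [gg_remove a i hi (j-1), gg_remove a i hi (j-1+1),
          if_neg (show ¬ j - 1 < i by omega), if_neg (show ¬ j - 1 + 1 < i by omega),
          if_neg (show ¬ j - 1 + 1 + 1 < i by omega)] at this
        rw [show j - 1 + 1 = j by omega, show j - 1 + 2 = j + 1 by omega] at this
        exact this
    · by_cases h0 : i ≤ 1
      · exact Or.inl (Or.inl h0)
      · by_cases h1 : i = n - 1
        · exact Or.inl (Or.inr h1)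
        · refine Or.inr ?_
          have := h (i-2) (by omega)
          rw [gg_remove a i hi (i-2), gg_remove a i hi (i-2+1),
            if_pos (show i - 2 < i by omega), if_pos (show i - 2 + 1 < i by omega),
            if_neg (show ¬ i - 2 + 1 + 1 < i by omega)] at this
          rw [show i - 2 + 1 = i - 1 by omega, show i - 1 + 2 = i + 1 by omega] at this
          rw [Int.gcd_comm (a.getD (i-1) 0) (a.getD (i-2) 0)]
          exact this
    · by_cases h0 : n - 2 ≤ i
      · exact Or.inl (Or.inl h0)
      · by_cases h1 : i = 0
        · exact Or.inl (Or.inr h1)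
        · refine Or.inr ?_
          have := h (i-1) (by omega)
          rw [gg_remove a i hi (i-1), gg_remove a i hi (i-1+1),
            if_pos (show i - 1 < i by omega), if_neg (show ¬ i - 1 + 1 < i by omega),
            if_neg (show ¬ i - 1 + 1 + 1 < i by omega)] at this
          rw [show i - 1 + 1 = i by omega, show i - 1 + 2 = i + 1 by omega] at this
          exact this

-- ===== VERDICT (by name: the statement is the Claim_ definition above) =====
theorem solve_spec : Claim_equal_solve := by
  intro a _ _
  unfold Spec_solve solve solve_alt
  rw [Bool.eq_iff_iff, List.any_eq_true, List.any_eq_true]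
  constructor
  · rintro ⟨i, hmem, hcond⟩
    exact ⟨i, hmem, (cond_iff a i (List.mem_range.mp hmem)).mp hcond⟩
  · rintro ⟨i, hmem, hcond⟩
    exact ⟨i, hmem, (cond_iff a i (List.mem_range.mp hmem)).mpr hcond⟩
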